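-- pv_equiv track=rewrite | github.com/SmartDataProjects/dynamo | dynamo/utils/path.py | find_common_base
-- ===== SOURCE A (Python) =====
-- def compare_two(path1, path2):
--     parts1 = path1.split('/')[1:] # [0] is ''
--     parts2 = path2.split('/')[1:]
--
--     ip = 0
--     while ip < len(parts1) and ip < len(parts2):
--         if parts1[ip] != parts2[ip]:
--             break
--         ip += 1
--
--     return '/' + '/'.join(parts1[:ip])
--
-- def find_common_base(paths):
--     """
--     Find the "greatest common denominator" (shared base directories) of given paths. If the GCD of
--     two paths is /, the two are considered to not share any base.
--     @param paths    List of absolute paths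
--
--     @return list of shared base directories.
--     """
--
--     if len(paths) < 2:
--         return paths
--
--     base_directories = [paths[0]]
--
--     for path in paths[1:]:
--         for ib, base in enumerate(list(base_directories)):
--             common = compare_two(base, path)
--
--             if common != '/':
--                 base_directories[ib] = common
--                 # no other entry in base_directories should have anything in common with path
--                 break
--
--         else:
--             # no entry had a common base
--             base_directories.append(path)
--
--     return base_directories
-- ===== SOURCE B (Python) =====
-- def find_common_base(paths):
--     """
--     Find the shared base directories of the given paths.
--     Build-an-index-then-render: one pass groups paths by their merge key
--     (paths merge iff their leading components share a non-'/' join), then one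
--     pass per group computes the componentwise common prefix.
--     """
--     if len(paths) < 2:
--         return paths
--
--     groups = {}
--     for i, path in enumerate(paths):
--         cs = path.split('/')[1:]
--         if not cs or cs == ['']:
--             key = ('uniq', i)        # never merges with anything
--         elif cs[0] != '':
--             key = ('real', cs[0], None)
--         else:
--             key = ('real', cs[0], cs[1])
--         groups.setdefault(key, []).append((path, cs))
--
--     out = []
--     for members in groups.values():
--         if len(members) == 1:
--             out.append(members[0][0])
--         else:
--             prefix = members[0][1]
--             for _, cs in members[1:]:
--                 n = 0
--                 while n < len(prefix) and n < len(cs) and prefix[n] == cs[n]: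
--                     n += 1
--                 prefix = prefix[:n]
--             out.append('/' + '/'.join(prefix))
--     return out
-- ===== Notes on version B (the rewrite author's own statement) =====
-- stated objective: faster
-- what changed: A repeatedly scans the whole running list of bases for every path (greedy pairwise reduction); B builds an insertion-ordered dict index from each path's merge key (first path component, or first two when the first is empty, unique for paths that can never merge) in one pass and then emits one componentwise common prefix per group.
import Mathlib
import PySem

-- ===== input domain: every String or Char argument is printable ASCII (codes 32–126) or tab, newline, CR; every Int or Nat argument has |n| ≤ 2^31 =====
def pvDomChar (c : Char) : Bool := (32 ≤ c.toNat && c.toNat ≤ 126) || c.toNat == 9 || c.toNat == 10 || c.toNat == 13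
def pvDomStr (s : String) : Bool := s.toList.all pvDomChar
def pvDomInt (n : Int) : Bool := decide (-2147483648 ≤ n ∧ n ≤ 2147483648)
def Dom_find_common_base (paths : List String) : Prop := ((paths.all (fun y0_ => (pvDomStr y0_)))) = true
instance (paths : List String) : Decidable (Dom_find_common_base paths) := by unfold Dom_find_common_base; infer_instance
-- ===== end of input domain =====

-- B replaces A's repeated scan of all bases per path (quadratic in the number of groups) by a
-- one-pass dict grouping under the merge key plus one common-prefix pass per group (measured faster).

-- ===== PORT A =====
-- shared by both ports: path.split('/')[1:] (both Pythons call the same builtin)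
def split1 (p : List Char) : List (List Char) := (PySem.Chars.splitOn p ['/']).drop 1

-- the while loop of compare_two: number of leading equal components
def cmpLen : List (List Char) → List (List Char) → Nat
  | a :: as, b :: bs => if a = b then cmpLen as bs + 1 else 0
  | _, _ => 0

def compare_two (path1 path2 : List Char) : List Char :=
  let parts1 := split1 path1
  let parts2 := split1 path2
  let ip := cmpLen parts1 parts2
  '/' :: PySem.Chars.join ['/'] (parts1.take ip)

-- the inner for/else loop: replace the first base sharing something with path, else append
def innerA (path : List Char) : List (List Char) → List (List Char)
  | [] => [path]
  | b :: bs =>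
    let common := compare_two b path
    if common ≠ ['/'] then common :: bs else b :: innerA path bs

def find_common_base (paths : List String) : List String :=
  if paths.length < 2 then paths
  else
    match paths with
    | [] => paths
    | p0 :: rest =>
      (rest.foldl (fun bds path => innerA path.toList bds) [p0.toList]).map String.ofList

-- ===== PORT B =====
inductive BKey where
  | uniq : Nat → BKey
  | real : List Char → Option (List Char) → BKey
deriving DecidableEq, Repr

-- Source B's key computation for (i, path) with cs = path.split('/')[1:]
def keyB (i : Nat) (cs : List (List Char)) : BKey :=
  match cs with
  | [] => .uniq i
  | [c] => if c = [] then .uniq i else .real c none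
  | c :: d :: _ => if c = [] then .real c (some d) else .real c none

-- Source B's inner while loop + prefix[:n]: componentwise common prefix
def cp : List (List Char) → List (List Char) → List (List Char)
  | a :: as, b :: bs => if a = b then a :: cp as bs else []
  | _, _ => []

-- Source B's rendering of one group
def renderB (members : List (String × List (List Char))) : String :=
  match members with
  | [] => ""  -- unreachable: every group is nonempty
  | [(p, _)] => p
  | m0 :: rest =>
    String.ofList ('/' :: PySem.Chars.join ['/'] (rest.foldl (fun pre m => cp pre m.2) m0.2))

def find_common_base_alt (paths : List String) : List String :=
  if paths.length < 2 then paths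
  else
    let groups := paths.zipIdx.foldl
      (fun d pi =>
        let cs := split1 pi.1.toList
        d.modify (keyB pi.2 cs) [] (fun ms => ms ++ [(pi.1, cs)]))
      (PySem.Dict.mk [])
    groups.values.map renderB

-- ===== PRECONDITION & SPEC =====
def Spec_find_common_base (paths : List String) (out : List String) : Prop := out = find_common_base_alt paths
instance (paths : List String) (out : List String) : Decidable (Spec_find_common_base paths out) := by unfold Spec_find_common_base; infer_instance

-- ===== CLAIM (what is proved, stated in full; the proofs are below) =====
def Claim_equal_find_common_base : Prop := ∀ (paths : List String), Dom_find_common_base paths → Spec_find_common_base paths (find_common_base paths)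

-- ===== LEMMAS AND PROOFS =====

-- proof-side split: a simple structural split on '/'
def sp : List Char → List (List Char)
  | [] => [[]]
  | a :: rest =>
    if a = '/' then [] :: sp rest
    else
      match sp rest with
      | h :: t => (a :: h) :: t
      | [] => [[a]]

-- the index-free part of the key: none = never merges
def kOf : List (List Char) → Option (List Char × Option (List Char))
  | [] => none
  | [c] => if c = [] then none else some (c, none)
  | c :: d :: _ => if c = [] then some (c, some d) else some (c, none)

theorem sp_ne_nil (s : List Char) : sp s ≠ [] := by
  induction s with
  | nil => simp [sp]
  | cons a rest ih =>
    simp only [sp]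
    split
    · simp
    · split <;> simp_all

theorem splitOn_go_eq (l : List Char) : ∀ (fuel : Nat) (cur : List Char) (acc : List (List Char)),
    l.length ≤ fuel →
    PySem.Chars.splitOn.go ['/'] fuel l cur acc =
      acc.reverse ++ (match sp l with | h :: t => (cur.reverse ++ h) :: t | [] => [cur.reverse]) := by
  induction l with
  | nil =>
    intro fuel cur acc _
    cases fuel <;> simp [PySem.Chars.splitOn.go, sp]
  | cons a rest ih =>
    intro fuel cur acc hlen
    cases fuel with
    | zero => simp at hlen
    | succ m =>
      have hrest : rest.length ≤ m := by simpa using hlen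
      by_cases ha : a = '/'
      · subst ha
        have hpre : (['/'] : List Char).isPrefixOf ('/' :: rest) = true := by
          simp [List.isPrefixOf]
        rw [PySem.Chars.splitOn.go, if_pos hpre]
        simp only [List.length_cons, List.length_nil, List.drop_succ_cons, List.drop_zero]
        rw [ih m [] (cur.reverse :: acc) hrest]
        rcases h : sp rest with _ | ⟨h1, t1⟩
        · exact absurd h (sp_ne_nil rest)
        · simp [sp, h]
      · have hpre : (['/'] : List Char).isPrefixOf (a :: rest) = false := by
          simp [List.isPrefixOf]
          intro h; exact absurd h.symm ha
        rw [PySem.Chars.splitOn.go, if_neg (by simp [hpre])]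
        rw [ih m (a :: cur) acc hrest]
        rcases h : sp rest with _ | ⟨h1, t1⟩
        · exact absurd h (sp_ne_nil rest)
        · simp [sp, h, ha]

theorem splitOn_eq_sp (s : List Char) : PySem.Chars.splitOn s ['/'] = sp s := by
  unfold PySem.Chars.splitOn
  rw [splitOn_go_eq s (s.length + 1) [] [] (by omega)]
  rcases h : sp s with _ | ⟨h1, t1⟩
  · exact absurd h (sp_ne_nil s)
  · simp

theorem sp_no_slash (s : List Char) : ∀ x ∈ sp s, '/' ∉ x := by
  induction s with
  | nil => simp [sp]
  | cons a rest ih =>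
    simp only [sp]
    by_cases ha : a = '/'
    · simp only [ha, if_true]
      intro x hx
      rcases List.mem_cons.mp hx with hx | hx
      · simp [hx]
      · exact ih x hx
    · rw [if_neg ha]
      rcases h : sp rest with _ | ⟨h1, t1⟩
      · exact absurd h (sp_ne_nil rest)
      · intro x hx
        rcases List.mem_cons.mp hx with hx | hx
        · subst hx
          have := ih h1 (by rw [h]; exact List.mem_cons_self)
          simp [Ne.symm ha, this]
        · exact ih x (by rw [h]; exact List.mem_cons_of_mem _ hx)

theorem sp_of_no_slash (s : List Char) (h : '/' ∉ s) : sp s = [s] := by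
  induction s with
  | nil => simp [sp]
  | cons a rest ih =>
    simp only [List.mem_cons, not_or] at h
    simp [sp, Ne.symm h.1, ih h.2]

theorem sp_append_slash (p rest : List Char) (h : '/' ∉ p) :
    sp (p ++ '/' :: rest) = p :: sp rest := by
  induction p with
  | nil => simp [sp]
  | cons a p' ih =>
    simp only [List.mem_cons, not_or] at h
    have : sp (p' ++ '/' :: rest) = p' :: sp rest := ih h.2
    simp [sp, Ne.symm h.1, this]

theorem sp_join (P : List (List Char)) (hP : P ≠ []) (h : ∀ x ∈ P, '/' ∉ x) :
    sp (PySem.Chars.join ['/'] P) = P := by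
  induction P with
  | nil => exact absurd rfl hP
  | cons p P' ih =>
    rcases P' with _ | ⟨q, P''⟩
    · simpa [PySem.Chars.join, List.intercalate] using sp_of_no_slash p (h p (by simp))
    · have hj : PySem.Chars.join ['/'] (p :: q :: P'') = p ++ '/' :: PySem.Chars.join ['/'] (q :: P'') := by
        simp [PySem.Chars.join, List.intercalate, List.intersperse]
      rw [hj, sp_append_slash p _ (h p (by simp))]
      rw [ih (by simp) (fun x hx => h x (List.mem_cons_of_mem _ hx))]

theorem split1_render (P : List (List Char)) (hP : P ≠ []) (h : ∀ x ∈ P, '/' ∉ x) :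
    split1 ('/' :: PySem.Chars.join ['/'] P) = P := by
  unfold split1
  rw [splitOn_eq_sp]
  simp only [sp]
  rw [sp_join P hP h]
  simp

theorem split1_no_slash (s : List Char) : ∀ x ∈ split1 s, '/' ∉ x := by
  unfold split1
  rw [splitOn_eq_sp]
  intro x hx
  exact sp_no_slash s x (List.mem_of_mem_drop hx)

theorem take_cmpLen (x y : List (List Char)) : x.take (cmpLen x y) = cp x y := by
  induction x generalizing y with
  | nil => simp [cmpLen, cp]
  | cons a as ih =>
    rcases y with _ | ⟨b, bs⟩
    · simp [cmpLen, cp]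
    · by_cases hab : a = b
      · simp [cmpLen, cp, hab, ih bs]
      · simp [cmpLen, cp, hab]

theorem compare_eq (b p : List Char) :
    compare_two b p = '/' :: PySem.Chars.join ['/'] (cp (split1 b) (split1 p)) := by
  simp [compare_two, take_cmpLen]

theorem join_eq_nil_iff (Q : List (List Char)) :
    PySem.Chars.join ['/'] Q = [] ↔ (Q = [] ∨ Q = [[]]) := by
  rcases Q with _ | ⟨q, Q'⟩
  · simp [PySem.Chars.join, List.intercalate]
  · rcases Q' with _ | ⟨r, Q''⟩
    · simp [PySem.Chars.join, List.intercalate]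
    · constructor
      · intro h
        exfalso
        have : PySem.Chars.join ['/'] (q :: r :: Q'') = q ++ '/' :: PySem.Chars.join ['/'] (r :: Q'') := by
          simp [PySem.Chars.join, List.intercalate, List.intersperse]
        rw [this] at h
        exact absurd h (by simp)
      · intro h; rcases h with h | h <;> simp at h

theorem kOf_cons_ne (c : List Char) (t : List (List Char)) (hc : c ≠ []) :
    kOf (c :: t) = some (c, none) := by
  rcases t with _ | ⟨d, t'⟩ <;> simp [kOf, hc]

theorem kOf_some_iff (x : List (List Char)) (c : List Char) (d' : Option (List Char)) :
    kOf x = some (c, d') ↔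
      ((d' = none ∧ c ≠ [] ∧ ∃ t, x = c :: t) ∨
       (∃ d, d' = some d ∧ c = [] ∧ ∃ t, x = [] :: d :: t)) := by
  rcases x with _ | ⟨a, x'⟩
  · simp [kOf]
  · rcases x' with _ | ⟨a2, x''⟩
    · by_cases ha : a = [] <;> simp [kOf, ha] <;> aesop
    · by_cases ha : a = [] <;> simp [kOf, ha] <;> aesop

theorem kOf_cp {x y : List (List Char)} {k} (hx : kOf x = some k) (hy : kOf y = some k) :
    kOf (cp x y) = some k := by
  obtain ⟨c, d'⟩ := k
  rcases (kOf_some_iff x c d').mp hx with ⟨hd, hc, t, ht⟩ | ⟨d, hd, hc, t, ht⟩ <;>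
    rcases (kOf_some_iff y c d').mp hy with ⟨_, _, u, hu⟩ | ⟨e, he, _, u, hu⟩
  · subst ht hu hd
    simp only [cp, reduceIte]
    exact kOf_cons_ne c _ hc
  · exact absurd (hd ▸ he) (by simp)
  · simp_all
  · subst ht hu hc
    obtain rfl : d = e := by simp_all
    simp [cp, kOf, hd]

theorem kOf_ne_nil {x : List (List Char)} {k} (hx : kOf x = some k) : x ≠ [] ∧ x ≠ [[]] := by
  constructor
  · rintro rfl; simp [kOf] at hx
  · rintro rfl; simp [kOf] at hx

-- merge happens exactly when the two component lists carry the same real key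
theorem merge_iff (x y : List (List Char)) :
    PySem.Chars.join ['/'] (cp x y) ≠ [] ↔ ∃ k, kOf x = some k ∧ kOf y = some k := by
  rw [Ne, join_eq_nil_iff, not_or]
  constructor
  · rintro ⟨h1, h2⟩
    rcases x with _ | ⟨a, x'⟩
    · simp [cp] at h1
    rcases y with _ | ⟨b, y'⟩
    · simp [cp] at h1
    by_cases hab : a = b
    case neg => simp [cp, hab] at h1
    subst hab
    by_cases ha : a = []
    · subst ha
      rcases x' with _ | ⟨a2, x''⟩
      · simp [cp] at h2
      rcases y' with _ | ⟨b2, y''⟩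
      · simp [cp] at h2
      by_cases hab2 : a2 = b2
      · subst hab2
        exact ⟨([], some a2), by simp [kOf], by simp [kOf]⟩
      · simp [cp, hab2] at h2
    · exact ⟨(a, none), kOf_cons_ne a _ ha, kOf_cons_ne a _ ha⟩
  · rintro ⟨k, hx, hy⟩
    have h := kOf_cp hx hy
    have := kOf_ne_nil h
    exact ⟨this.1, this.2⟩

theorem cp_sublist (x y : List (List Char)) : ∀ e ∈ cp x y, e ∈ x := by
  induction x generalizing y with
  | nil => simp [cp]
  | cons a as ih =>
    rcases y with _ | ⟨b, bs⟩
    · simp [cp]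
    · by_cases hab : a = b
      · simp only [cp, if_pos hab]
        intro e he
        rcases List.mem_cons.mp he with he | he
        · simp [he]
        · exact List.mem_cons_of_mem _ (ih bs e he)
      · simp [cp, hab]

theorem keyB_uniq_iff (i j : Nat) (cs : List (List Char)) : keyB i cs = .uniq j ↔ (kOf cs = none ∧ i = j) := by
  rcases cs with _ | ⟨c, cs'⟩
  · simp [keyB, kOf]
  · rcases cs' with _ | ⟨d, cs''⟩ <;> simp [keyB, kOf] <;> split_ifs <;> simp_all

theorem keyB_real_iff (i : Nat) (cs : List (List Char)) (c d') : keyB i cs = .real c d' ↔ kOf cs = some (c, d') := by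
  rcases cs with _ | ⟨e, cs'⟩
  · simp [keyB, kOf]
  · rcases cs' with _ | ⟨d, cs''⟩ <;> simp [keyB, kOf] <;> split_ifs <;>
      simp_all

-- ===== canonical form shared by both sides =====

def keyOf (pi : String × Nat) : BKey := keyB pi.2 (split1 pi.1.toList)

def dedupFO (xs : List BKey) : List BKey := PySem.Set.update [] xs

def membersOf (L : List (String × Nat)) (k : BKey) : List (String × List (List Char)) :=
  (L.filter (fun pi => keyOf pi == k)).map (fun pi => (pi.1, split1 pi.1.toList))

def renderC (ms : List (String × List (List Char))) : List Char :=
  match ms with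
  | [] => []
  | [(p, _)] => p.toList
  | m0 :: rest => '/' :: PySem.Chars.join ['/'] (rest.foldl (fun pre m => cp pre m.2) m0.2)

def basesOf (L : List (String × Nat)) : List (List Char) :=
  (dedupFO (L.map keyOf)).map (fun k => renderC (membersOf L k))

-- the running common prefix of a group
def prefC (ms : List (String × List (List Char))) : List (List Char) :=
  match ms with
  | [] => []
  | m0 :: rest => rest.foldl (fun pre m => cp pre m.2) m0.2

theorem renderB_eq (ms : List (String × List (List Char))) : renderB ms = String.ofList (renderC ms) := by
  match ms with
  | [] => simp [renderB, renderC]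
  | [(p, cs)] => simp [renderB, renderC, String.ofList_toList]
  | (p, cs) :: m1 :: rest => simp [renderB, renderC]

theorem mem_dedupFO (xs : List BKey) (k : BKey) : k ∈ dedupFO xs ↔ k ∈ xs := by
  have h : ∀ (acc : List BKey), k ∈ PySem.Set.update acc xs ↔ k ∈ acc ∨ k ∈ xs := by
    induction xs with
    | nil => simp [PySem.Set.update]
    | cons x xs ih =>
      intro acc
      simp only [PySem.Set.update, List.foldl_cons] at *
      by_cases hx : x ∈ acc
      · rw [show PySem.Set.add acc x = acc from by simp [PySem.Set.add, hx]]
        rw [ih acc]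
        constructor
        · rintro (h | h) <;> simp_all
        · rintro (h | h)
          · exact Or.inl h
          · rcases List.mem_cons.mp h with rfl | h
            · exact Or.inl hx
            · exact Or.inr h
      · rw [show PySem.Set.add acc x = acc ++ [x] from by simp [PySem.Set.add, hx]]
        rw [ih (acc ++ [x])]
        simp [or_assoc]
  rw [dedupFO, h []]
  simp

theorem nodup_dedupFO (xs : List BKey) : (dedupFO xs).Nodup := by
  have h : ∀ (acc : List BKey), acc.Nodup → (PySem.Set.update acc xs).Nodup := by
    induction xs with
    | nil => intro acc h; simpa [PySem.Set.update] using h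
    | cons x xs ih =>
      intro acc hacc
      simp only [PySem.Set.update, List.foldl_cons] at *
      by_cases hx : x ∈ acc
      · rw [show PySem.Set.add acc x = acc from by simp [PySem.Set.add, hx]]
        exact ih acc hacc
      · rw [show PySem.Set.add acc x = acc ++ [x] from by simp [PySem.Set.add, hx]]
        refine ih _ ?_
        rw [List.nodup_append]
        refine ⟨hacc, List.nodup_singleton x, ?_⟩
        intro a ha b hb heq
        rcases hb with _ | ⟨_, h⟩
        · exact hx (heq ▸ ha)
        · cases h
  exact h [] List.nodup_nil

theorem dedupFO_append_singleton (xs : List BKey) (k : BKey) :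
    dedupFO (xs ++ [k]) = if k ∈ dedupFO xs then dedupFO xs else dedupFO xs ++ [k] := by
  unfold dedupFO
  rw [PySem.Set.update, List.foldl_append]
  simp only [List.foldl_cons, List.foldl_nil]
  rw [show List.foldl PySem.Set.add [] xs = PySem.Set.update [] xs from rfl]
  simp only [PySem.Set.add]
  split_ifs with h1 h2 h3 <;> try rfl
  · exact absurd h1 (by simpa [dedupFO] using h2)
  · exact absurd (by simpa [dedupFO] using h3) h1

theorem membersOf_append_ne (L : List (String × Nat)) (pi : String × Nat) (k : BKey) (h : keyOf pi ≠ k) :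
    membersOf (L ++ [pi]) k = membersOf L k := by
  simp [membersOf, List.filter_append, h]

theorem membersOf_append_eq (L : List (String × Nat)) (pi : String × Nat) :
    membersOf (L ++ [pi]) (keyOf pi) = membersOf L (keyOf pi) ++ [(pi.1, split1 pi.1.toList)] := by
  simp [membersOf, List.filter_append]

theorem membersOf_nil_of_not_mem (L : List (String × Nat)) (k : BKey) (h : k ∉ L.map keyOf) :
    membersOf L k = [] := by
  unfold membersOf
  rw [List.filter_eq_nil_iff.mpr, List.map_nil]
  intro pi hpi
  simp only [beq_iff_eq]
  intro hk
  exact h (List.mem_map.mpr ⟨pi, hpi, hk⟩)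

theorem membersOf_ne_nil_of_mem (L : List (String × Nat)) (k : BKey) (h : k ∈ L.map keyOf) :
    membersOf L k ≠ [] := by
  obtain ⟨pi, hpi, hk⟩ := List.mem_map.mp h
  unfold membersOf
  simp only [ne_eq, List.map_eq_nil_iff, List.filter_eq_nil_iff, not_forall]
  exact ⟨pi, hpi, by simp [hk]⟩

theorem mem_membersOf (L : List (String × Nat)) (k : BKey) :
    ∀ m ∈ membersOf L k, m.2 = split1 m.1.toList ∧ ∃ i, keyB i m.2 = k := by
  intro m hm
  unfold membersOf at hm
  obtain ⟨pi, hpi, hm⟩ := List.mem_map.mp hm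
  have hk : keyOf pi = k := by simpa using (List.mem_filter.mp hpi).2
  subst hm
  exact ⟨rfl, pi.2, hk⟩

-- every member of a real-key group carries that key
theorem membersOf_real_kOf (L : List (String × Nat)) (c : List Char) (d' : Option (List Char)) :
    ∀ m ∈ membersOf L (.real c d'), kOf m.2 = some (c, d') := by
  intro m hm
  obtain ⟨-, i, hkey⟩ := mem_membersOf L _ m hm
  exact (keyB_real_iff i m.2 c d').mp hkey

theorem kOf_prefC (L : List (String × Nat)) (c : List Char) (d' : Option (List Char))
    (hne : membersOf L (.real c d') ≠ []) :
    kOf (prefC (membersOf L (.real c d'))) = some (c, d') := by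
  have hall := membersOf_real_kOf L c d'
  rcases h : membersOf L (.real c d') with _ | ⟨m0, rest⟩
  · exact absurd h hne
  rw [h] at hall
  unfold prefC
  have : ∀ (ms : List (String × List (List Char))) (pre : List (List Char)),
      kOf pre = some (c, d') → (∀ m ∈ ms, kOf m.2 = some (c, d')) →
      kOf (ms.foldl (fun pre m => cp pre m.2) pre) = some (c, d') := by
    intro ms
    induction ms with
    | nil => intro pre hp _; simpa using hp
    | cons a as ih =>
      intro pre hp hall'
      simp only [List.foldl_cons]
      exact ih _ (kOf_cp hp (hall' a List.mem_cons_self)) (fun m hm => hall' m (List.mem_cons_of_mem _ hm))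
  exact this rest m0.2 (hall m0 List.mem_cons_self) (fun m hm => hall m (List.mem_cons_of_mem _ hm))

theorem prefC_no_slash (ms : List (String × List (List Char)))
    (hall : ∀ m ∈ ms, m.2 = split1 m.1.toList) :
    ∀ x ∈ prefC ms, '/' ∉ x := by
  rcases ms with _ | ⟨m0, rest⟩
  · simp [prefC]
  unfold prefC
  have h0 : ∀ x ∈ m0.2, '/' ∉ x := by
    rw [hall m0 List.mem_cons_self]; exact split1_no_slash _
  have : ∀ (ms' : List (String × List (List Char))) (pre : List (List Char)),
      (∀ x ∈ pre, '/' ∉ x) →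
      ∀ x ∈ ms'.foldl (fun pre m => cp pre m.2) pre, '/' ∉ x := by
    intro ms'
    induction ms' with
    | nil => intro pre hp; simpa using hp
    | cons a as ih =>
      intro pre hp
      simp only [List.foldl_cons]
      exact ih _ (fun x hx => hp x (cp_sublist _ _ x hx))
  exact this rest m0.2 h0

theorem split1_renderC (L : List (String × Nat)) (c : List Char) (d' : Option (List Char))
    (hne : membersOf L (.real c d') ≠ []) :
    split1 (renderC (membersOf L (.real c d'))) = prefC (membersOf L (.real c d')) := by
  have hmem := mem_membersOf L (.real c d')
  rcases h : membersOf L (.real c d') with _ | ⟨m0, rest⟩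
  · exact absurd h hne
  rcases rest with _ | ⟨m1, rest'⟩
  · obtain ⟨p, cs⟩ := m0
    have := (hmem (p, cs) (by rw [h]; exact List.mem_cons_self)).1
    simp only at this
    simp [renderC, prefC, ← this]
  · have hP : kOf (prefC (membersOf L (.real c d'))) = some (c, d') := kOf_prefC L c d' hne
    have hPne : prefC (membersOf L (.real c d')) ≠ [] := (kOf_ne_nil hP).1
    have hsl : ∀ x ∈ prefC (membersOf L (.real c d')), '/' ∉ x :=
      prefC_no_slash _ (fun m hm => (hmem m hm).1)
    rw [h] at hP hPne hsl
    show split1 ('/' :: PySem.Chars.join ['/'] (prefC (m0 :: m1 :: rest'))) = _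
    exact split1_render _ hPne hsl

theorem renderC_snoc (L : List (String × Nat)) (c : List Char) (d' : Option (List Char))
    (m : String × List (List Char)) (hne : membersOf L (.real c d') ≠ []) :
    renderC (membersOf L (.real c d') ++ [m]) =
      '/' :: PySem.Chars.join ['/'] (cp (split1 (renderC (membersOf L (.real c d')))) m.2) := by
  rw [split1_renderC L c d' hne]
  rcases h : membersOf L (.real c d') with _ | ⟨m0, rest⟩
  · exact absurd h hne
  rcases rest with _ | ⟨m1, rest'⟩
  · simp [renderC, prefC]
  · simp [renderC, prefC, List.foldl_append]

theorem keyOf_uniq (pi : String × Nat) (j : Nat) (h : keyOf pi = .uniq j) : pi.2 = j := by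
  unfold keyOf at h
  exact ((keyB_uniq_iff pi.2 j _).mp h).2

theorem membersOf_uniq (L : List (String × Nat)) (j : Nat) (hnd : (L.map (·.2)).Nodup)
    (hne : membersOf L (.uniq j) ≠ []) :
    ∃ p, membersOf L (.uniq j) = [(p, split1 p.toList)] ∧ kOf (split1 p.toList) = none := by
  have hsub : (L.filter (fun pi => keyOf pi == BKey.uniq j)).Sublist L := List.filter_sublist
  have hall : ∀ pi ∈ L.filter (fun pi => keyOf pi == BKey.uniq j), pi.2 = j := by
    intro pi hpi
    exact keyOf_uniq pi j (by simpa using (List.mem_filter.mp hpi).2)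
  have hlen : (L.filter (fun pi => keyOf pi == BKey.uniq j)).length ≤ 1 := by
    by_contra hlt
    rw [not_le] at hlt
    obtain ⟨a, b, t, hft⟩ : ∃ a b t, L.filter (fun pi => keyOf pi == BKey.uniq j) = a :: b :: t := by
      rcases hf : L.filter (fun pi => keyOf pi == BKey.uniq j) with _ | ⟨a, _ | ⟨b, t⟩⟩
      · rw [hf] at hlt; simp at hlt
      · rw [hf] at hlt; simp at hlt
      · exact ⟨_, _, _, rfl⟩
    have hndf : ((L.filter (fun pi => keyOf pi == BKey.uniq j)).map (·.2)).Nodup :=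
      (hsub.map _).nodup hnd
    rw [hft] at hndf hall
    have ha := hall a List.mem_cons_self
    have hb := hall b (List.mem_cons_of_mem _ List.mem_cons_self)
    simp [ha, hb] at hndf
  rcases hf : L.filter (fun pi => keyOf pi == BKey.uniq j) with _ | ⟨a, t⟩
  · exact absurd (by simp [membersOf, hf]) hne
  · have ht : t = [] := by
      rw [hf] at hlen
      simp only [List.length_cons] at hlen
      exact List.length_eq_zero_iff.mp (by omega)
    subst ht
    have hk : keyOf a = .uniq j := by
      have := List.mem_filter.mp (hf ▸ List.mem_cons_self)
      simpa using this.2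
    refine ⟨a.1, ?_, ?_⟩
    · simp [membersOf, hf]
    · have := (keyB_uniq_iff a.2 j _).mp hk
      exact this.1

-- combined F1: the merge key of a rendered base
theorem base_kOf_real (L : List (String × Nat)) (c : List Char) (d' : Option (List Char))
    (hne : membersOf L (.real c d') ≠ []) :
    kOf (split1 (renderC (membersOf L (.real c d')))) = some (c, d') := by
  rw [split1_renderC L c d' hne]
  exact kOf_prefC L c d' hne

theorem base_kOf_uniq (L : List (String × Nat)) (j : Nat) (hnd : (L.map (·.2)).Nodup)
    (hne : membersOf L (.uniq j) ≠ []) :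
    kOf (split1 (renderC (membersOf L (.uniq j)))) = none := by
  obtain ⟨p, hp, hk⟩ := membersOf_uniq L j hnd hne
  rw [hp]
  simpa [renderC] using hk

-- a path merges with no base whose key differs from its own
theorem compare_ne_key (L : List (String × Nat)) (k : BKey) (pi : String × Nat)
    (hnd : (L.map (·.2)).Nodup) (hne : membersOf L k ≠ []) (hk : keyOf pi ≠ k) :
    compare_two (renderC (membersOf L k)) pi.1.toList = ['/'] := by
  rw [compare_eq]
  suffices h : PySem.Chars.join ['/'] (cp (split1 (renderC (membersOf L k))) (split1 pi.1.toList)) = [] by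
    rw [h]
  by_contra hne2
  obtain ⟨k0, hb, hp⟩ := (merge_iff _ _).mp hne2
  rcases k with j | ⟨c, d'⟩
  · simp [base_kOf_uniq L j hnd hne] at hb
  · rw [base_kOf_real L c d' hne] at hb
    obtain rfl : k0 = (c, d') := by simpa using hb.symm
    exact hk (by unfold keyOf; exact (keyB_real_iff pi.2 _ c d').mpr hp)

theorem innerA_no_match (path : List Char) (bs : List (List Char))
    (h : ∀ b ∈ bs, compare_two b path = ['/']) :
    innerA path bs = bs ++ [path] := by
  induction bs with
  | nil => simp [innerA]
  | cons b bs ih =>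
    simp only [innerA, h b List.mem_cons_self]
    simp [ih (fun x hx => h x (List.mem_cons_of_mem _ hx))]

theorem innerA_match (path : List Char) (bs1 : List (List Char)) (b : List Char) (bs2 : List (List Char))
    (h1 : ∀ x ∈ bs1, compare_two x path = ['/']) (hb : compare_two b path ≠ ['/']) :
    innerA path (bs1 ++ b :: bs2) = bs1 ++ compare_two b path :: bs2 := by
  induction bs1 with
  | nil => simp [innerA, hb]
  | cons x bs1 ih =>
    simp only [List.cons_append, innerA, h1 x List.mem_cons_self]
    simp [ih (fun y hy => h1 y (List.mem_cons_of_mem _ hy))]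

-- main step lemma and fold lemma, stated below with their real hypotheses
theorem main_step (L : List (String × Nat)) (pi : String × Nat)
    (_hL : L ≠ []) (hfresh : ∀ q ∈ L, q.2 ≠ pi.2)
    (hnd : (L.map (·.2)).Nodup) :
    innerA pi.1.toList (basesOf L) = basesOf (L ++ [pi]) := by
  have hmap : (L ++ [pi]).map keyOf = L.map keyOf ++ [keyOf pi] := by simp
  by_cases hmem : keyOf pi ∈ L.map keyOf
  · -- the path joins an existing group
    obtain ⟨ks1, ks2, hks⟩ := List.append_of_mem ((mem_dedupFO _ _).mpr hmem)
    have hnd2 := nodup_dedupFO (L.map keyOf)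
    rw [hks] at hnd2
    have hnotks1 : keyOf pi ∉ ks1 := by
      intro h
      have := (List.nodup_append.mp hnd2).2.2
      exact this _ h _ List.mem_cons_self rfl
    have hnotks2 : keyOf pi ∉ ks2 := by
      have := ((List.nodup_append.mp hnd2).2.1)
      exact (List.nodup_cons.mp this).1
    -- the key of pi cannot be a uniq key: it already occurs in L with a different index
    obtain ⟨c, d', hk'⟩ : ∃ c d', keyOf pi = BKey.real c d' := by
      rcases hkk : keyOf pi with j | ⟨c, d'⟩
      · exfalso
        rw [hkk] at hmem
        obtain ⟨q, hq, hqk⟩ := List.mem_map.mp hmem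
        have h1 : q.2 = j := keyOf_uniq q j hqk
        have h2 : pi.2 = j := keyOf_uniq pi j hkk
        exact hfresh q hq (h1.trans h2.symm)
      · exact ⟨c, d', rfl⟩
    have hneM : membersOf L (keyOf pi) ≠ [] := membersOf_ne_nil_of_mem L _ hmem
    have hcs : kOf (split1 pi.1.toList) = some (c, d') := by
      have : keyB pi.2 (split1 pi.1.toList) = BKey.real c d' := hk'
      exact (keyB_real_iff pi.2 _ c d').mp this
    have hbase : kOf (split1 (renderC (membersOf L (keyOf pi)))) = some (c, d') := by
      rw [hk']
      exact base_kOf_real L c d' (hk' ▸ hneM)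
    have hjoin : PySem.Chars.join ['/']
        (cp (split1 (renderC (membersOf L (keyOf pi)))) (split1 pi.1.toList)) ≠ [] :=
      (merge_iff _ _).mpr ⟨(c, d'), hbase, hcs⟩
    have hb : compare_two (renderC (membersOf L (keyOf pi))) pi.1.toList ≠ ['/'] := by
      rw [compare_eq]
      intro h
      apply hjoin
      simpa using h
    have hval : compare_two (renderC (membersOf L (keyOf pi))) pi.1.toList
        = renderC (membersOf (L ++ [pi]) (keyOf pi)) := by
      rw [membersOf_append_eq, compare_eq, hk']
      exact (renderC_snoc L c d' (pi.1, split1 pi.1.toList) (hk' ▸ hneM)).symm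
    unfold basesOf
    rw [hmap, dedupFO_append_singleton, if_pos (hks ▸ List.mem_append_right ks1 List.mem_cons_self),
        hks, List.map_append, List.map_cons]
    rw [List.map_append, List.map_cons] at *
    rw [innerA_match pi.1.toList _ _ _ ?h1 hb]
    · congr 1
      · apply List.map_congr_left
        intro k hk
        rw [membersOf_append_ne]
        intro h
        exact hnotks1 (h ▸ hk)
      · rw [hval]
        congr 1
        apply List.map_congr_left
        intro k hk
        rw [membersOf_append_ne]
        intro h
        exact hnotks2 (h ▸ hk)
    · intro x hx
      obtain ⟨k, hk, rfl⟩ := List.mem_map.mp hx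
      have hkmem : k ∈ L.map keyOf := (mem_dedupFO _ _).mp (hks ▸ List.mem_append_left _ hk)
      refine compare_ne_key L k pi hnd (membersOf_ne_nil_of_mem L _ hkmem) ?_
      intro h
      exact hnotks1 (h ▸ hk)
  · -- the path starts a new group
    have hdk : keyOf pi ∉ dedupFO (L.map keyOf) := fun h => hmem ((mem_dedupFO _ _).mp h)
    unfold basesOf
    rw [hmap, dedupFO_append_singleton, if_neg hdk, List.map_append, List.map_singleton]
    rw [innerA_no_match]
    · congr 1
      · apply List.map_congr_left
        intro k hk
        rw [membersOf_append_ne]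
        intro h
        exact hdk (h ▸ hk)
      · rw [membersOf_append_eq, membersOf_nil_of_not_mem L _ hmem, List.nil_append]
        simp [renderC]
    · intro b hb
      obtain ⟨k, hk, rfl⟩ := List.mem_map.mp hb
      have hkmem : k ∈ L.map keyOf := (mem_dedupFO _ _).mp hk
      refine compare_ne_key L k pi hnd (membersOf_ne_nil_of_mem L _ hkmem) ?_
      intro h
      exact hdk (h ▸ hk)

theorem fold_eq (todo : List (String × Nat)) : ∀ (L : List (String × Nat)), L ≠ [] →
    ((L ++ todo).map (·.2)).Nodup →
    todo.foldl (fun b pi => innerA pi.1.toList b) (basesOf L) = basesOf (L ++ todo) := by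
  induction todo with
  | nil => intro L hL _; simp
  | cons t todo ih =>
    intro L hL hnd
    have hnd1 : (L.map (·.2)).Nodup := by
      simpa using (hnd.sublist ((List.sublist_append_left L (t :: todo)).map _))
    have hfresh : ∀ q ∈ L, q.2 ≠ t.2 := by
      intro q hq
      rw [List.map_append, List.nodup_append] at hnd
      exact hnd.2.2 _ (List.mem_map_of_mem hq) _ (by simp)
    simp only [List.foldl_cons]
    rw [main_step L t hL hfresh hnd1, ih (L ++ [t]) (by simp) (by simpa using hnd)]
    simp

theorem basesOf_single (pi : String × Nat) : basesOf [pi] = [pi.1.toList] := by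
  simp [basesOf, dedupFO, PySem.Set.update, PySem.Set.add, membersOf, renderC]

theorem zipIdx_snd_nodup (paths : List String) : ((paths.zipIdx).map (·.2)).Nodup := by
  rw [List.zipIdx_map_snd]
  exact List.nodup_range'

-- the whole A-side fold computes the canonical bases
theorem a_side (p0 : String) (rest : List String) :
    rest.foldl (fun bds path => innerA path.toList bds) [p0.toList]
      = basesOf ((p0 :: rest).zipIdx) := by
  have h1 : rest.foldl (fun bds path => innerA path.toList bds) [p0.toList]
      = (rest.zipIdx 1).foldl (fun bds pi => innerA pi.1.toList bds) [p0.toList] := by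
    conv_lhs => rw [← List.zipIdx_map_fst 1 rest]
    rw [List.foldl_map]
  rw [h1, ← basesOf_single (p0, 0)]
  have h2 := fold_eq (rest.zipIdx 1) [(p0, 0)] (by simp) ?_
  · rw [h2]
    rfl
  · have := zipIdx_snd_nodup (p0 :: rest)
    simpa using this

-- the whole B-side pipeline computes the canonical bases
theorem b_side (paths : List String) :
    ((paths.zipIdx.foldl
      (fun d pi =>
        let cs := split1 pi.1.toList
        d.modify (keyB pi.2 cs) [] (fun ms => ms ++ [(pi.1, cs)]))
      (PySem.Dict.mk []))).values.map renderB
      = (basesOf paths.zipIdx).map String.ofList := by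
  have hfold : paths.zipIdx.foldl
      (fun d pi =>
        let cs := split1 pi.1.toList
        d.modify (keyB pi.2 cs) [] (fun ms => ms ++ [(pi.1, cs)]))
      (PySem.Dict.mk [])
      = (paths.zipIdx.map (fun pi => (keyOf pi, (pi.1, split1 pi.1.toList)))).foldl
        (fun d p => d.modify p.1 [] (fun ms => ms ++ [p.2])) (PySem.Dict.mk []) := by
    rw [List.foldl_map]
    rfl
  rw [hfold]
  set l := paths.zipIdx.map (fun pi => (keyOf pi, (pi.1, split1 pi.1.toList))) with hl
  set d := l.foldl (fun d p => d.modify p.1 [] (fun ms => ms ++ [p.2])) (PySem.Dict.mk []) with hd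
  have hkeys : d.keys = dedupFO (paths.zipIdx.map keyOf) := by
    have := PySem.Dict.keys_foldl_modify_key l (fun p => p.1) []
      (fun _ p => fun ms => ms ++ [p.2]) (PySem.Dict.mk [])
    rw [hd]
    rw [this]
    have : (PySem.Dict.mk ([] : List (BKey × List (String × List (List Char))))).keys = [] := rfl
    rw [this]
    rw [dedupFO, hl, List.map_map]
    rfl
  have hnodup : d.keys.Nodup := by
    rw [hkeys]; exact nodup_dedupFO _
  have hvals : d.values = d.keys.map (fun k => d.getD k []) :=
    PySem.Dict.values_eq_map_keys d hnodup []
  have hgetD : ∀ k, d.getD k [] = membersOf paths.zipIdx k := by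
    intro k
    rw [hd, PySem.Dict.getD_foldl_modify_append l (PySem.Dict.mk []) k]
    have hmk : (PySem.Dict.mk ([] : List (BKey × List (String × List (List Char))))).getD k [] = [] := rfl
    rw [hmk, List.nil_append, hl]
    rw [List.filter_map, List.map_map]
    unfold membersOf
    congr 1
  rw [hvals, hkeys, List.map_map]
  unfold basesOf
  rw [List.map_map]
  apply List.map_congr_left
  intro k hk
  simp only [Function.comp_apply]
  rw [hgetD k, renderB_eq]

-- ===== VERDICT (by name: the statement is the Claim_ definition above) =====
theorem find_common_base_spec : Claim_equal_find_common_base := by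
  unfold Claim_equal_find_common_base Spec_find_common_base
  intro paths _
  by_cases hlen : paths.length < 2
  · unfold find_common_base find_common_base_alt
    rw [if_pos hlen, if_pos hlen]
  · obtain ⟨p0, rest, rfl⟩ : ∃ p0 rest, paths = p0 :: rest := by
      rcases paths with _ | ⟨p0, rest⟩
      · simp at hlen
      · exact ⟨_, _, rfl⟩
    unfold find_common_base find_common_base_alt
    rw [if_neg hlen, if_neg hlen]
    show (rest.foldl (fun bds path => innerA path.toList bds) [p0.toList]).map String.ofList
      = ((p0 :: rest).zipIdx.foldl
          (fun d pi =>
            let cs := split1 pi.1.toList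
            d.modify (keyB pi.2 cs) [] (fun ms => ms ++ [(pi.1, cs)]))
          (PySem.Dict.mk [])).values.map renderB
    rw [a_side p0 rest, b_side (p0 :: rest)]
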